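-- pv_equiv track=rewrite | github.com/jhiltonsantos/ADS-Algoritmos-IFPI | AtividadeURI_3_Iterações/uri_1132_multiplos_13.py | multiplo
-- ===== SOURCE A (Python) =====
-- def verifica_maior(valor_x, valor_y):
--     x = valor_x
--     y = valor_y
--
--     if valor_y > valor_x:
--         x = valor_y
--         y = valor_x
--
--     return x,y
--
-- def multiplo(valor_x, valor_y):
--     x,y = verifica_maior(valor_x,valor_y)
--     soma = 0
--
--     while y <= x:
--         if y % 13 != 0:
--             soma = soma + y
--         y += 1
--
--     return soma
-- ===== SOURCE B (Python) =====
-- def multiplo(valor_x, valor_y):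
--     lo = min(valor_x, valor_y)
--     hi = max(valor_x, valor_y)
--     total = (lo + hi) * (hi - lo + 1) // 2
--     k1 = (lo - 1) // 13
--     k2 = hi // 13
--     mult13 = 13 * (k1 + k2 + 1) * (k2 - k1) // 2
--     return total - mult13
-- ===== Notes on version B (the rewrite author's own statement) =====
-- stated objective: faster
-- what changed: Replaces the element-by-element summation loop with a closed-form arithmetic-series formula: total sum of the range minus the sum of its multiples of 13, computed via floor divisions.
import Mathlib
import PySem

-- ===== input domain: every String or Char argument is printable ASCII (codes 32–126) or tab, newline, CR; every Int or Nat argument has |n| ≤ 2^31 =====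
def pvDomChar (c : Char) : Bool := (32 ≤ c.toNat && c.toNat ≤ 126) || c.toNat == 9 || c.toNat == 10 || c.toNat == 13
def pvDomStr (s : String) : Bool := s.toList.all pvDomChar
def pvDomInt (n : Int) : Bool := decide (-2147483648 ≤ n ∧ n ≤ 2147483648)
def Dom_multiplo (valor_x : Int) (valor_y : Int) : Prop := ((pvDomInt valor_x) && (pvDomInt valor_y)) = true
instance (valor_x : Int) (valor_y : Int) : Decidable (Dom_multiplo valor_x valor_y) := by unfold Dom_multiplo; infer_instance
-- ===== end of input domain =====

-- B replaces A's element-by-element summation loop with a closed-form arithmetic-series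
-- computation (total range sum minus sum of multiples of 13); objective: faster.

-- ===== PORT A =====
def verifica_maior (valor_x : Int) (valor_y : Int) : Int × Int :=
  let x := valor_x
  let y := valor_y
  if valor_y > valor_x then (valor_y, valor_x) else (x, y)

-- the while loop of A: while y <= x: if y % 13 != 0: soma += y; y += 1
def multiploLoop (x : Int) (y : Int) (soma : Int) : Int :=
  if _h : y ≤ x then
    multiploLoop x (y + 1) (if PySem.Int.mod y 13 ≠ 0 then soma + y else soma)
  else soma
termination_by (x + 1 - y).toNat
decreasing_by omega

def multiplo (valor_x : Int) (valor_y : Int) : Int :=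
  let p := verifica_maior valor_x valor_y
  multiploLoop p.1 p.2 0

-- ===== PORT B =====
def multiplo_alt (valor_x : Int) (valor_y : Int) : Int :=
  let lo := min valor_x valor_y
  let hi := max valor_x valor_y
  let total := PySem.Int.floordiv ((lo + hi) * (hi - lo + 1)) 2
  let k1 := PySem.Int.floordiv (lo - 1) 13
  let k2 := PySem.Int.floordiv hi 13
  let mult13 := PySem.Int.floordiv (13 * (k1 + k2 + 1) * (k2 - k1)) 2
  total - mult13

-- ===== PRECONDITION & SPEC =====
def Spec_multiplo (valor_x : Int) (valor_y : Int) (out : Int) : Prop := out = multiplo_alt valor_x valor_y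
instance (valor_x : Int) (valor_y : Int) (out : Int) : Decidable (Spec_multiplo valor_x valor_y out) := by unfold Spec_multiplo; infer_instance

-- ===== CLAIM (what is proved, stated in full; the proofs are below) =====
def Claim_equal_multiplo : Prop := ∀ (valor_x : Int) (valor_y : Int), Dom_multiplo valor_x valor_y → Spec_multiplo valor_x valor_y (multiplo valor_x valor_y)

-- ===== LEMMAS AND PROOFS =====

-- B's closed form as a function of the ordered endpoints
def gAux (lo : Int) (hi : Int) : Int :=
  PySem.Int.floordiv ((lo + hi) * (hi - lo + 1)) 2
    - PySem.Int.floordiv (13 * (PySem.Int.floordiv (lo - 1) 13 + PySem.Int.floordiv hi 13 + 1)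
        * (PySem.Int.floordiv hi 13 - PySem.Int.floordiv (lo - 1) 13)) 2

theorem multiplo_alt_eq_gAux (a b : Int) : multiplo_alt a b = gAux (min a b) (max a b) := rfl

-- floor division of a product (a*b) by 2 when a + b is odd: the product is even and
-- the division is exact
theorem fdiv_two_exact (a b : Int) (h : (a + b) % 2 = 1) :
    2 * PySem.Int.floordiv (a * b) 2 = a * b := by
  rw [PySem.Int.floordiv_eq_ediv_of_pos (by norm_num)]
  rcases Int.even_or_odd a with he | ho
  · obtain ⟨k, hk⟩ := he
    subst hk
    rw [show k + k = 2 * k by ring, mul_assoc, Int.mul_ediv_cancel_left _ (by norm_num)]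
  · obtain ⟨m, hm⟩ := ho
    have hb : b % 2 = 0 := by omega
    obtain ⟨k, hk⟩ := Int.dvd_of_emod_eq_zero hb
    subst hk
    rw [show a * (2 * k) = 2 * (a * k) by ring, Int.mul_ediv_cancel_left _ (by norm_num)]

theorem gAux_double (lo hi : Int) :
    2 * gAux lo hi = (lo + hi) * (hi - lo + 1)
      - 13 * (PySem.Int.floordiv (lo - 1) 13 + PySem.Int.floordiv hi 13 + 1)
          * (PySem.Int.floordiv hi 13 - PySem.Int.floordiv (lo - 1) 13) := by
  unfold gAux
  have h1 : 2 * PySem.Int.floordiv ((lo + hi) * (hi - lo + 1)) 2 = (lo + hi) * (hi - lo + 1) :=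
    fdiv_two_exact (lo + hi) (hi - lo + 1) (by omega)
  set a := PySem.Int.floordiv (lo - 1) 13
  set b := PySem.Int.floordiv hi 13
  have h2 : 2 * PySem.Int.floordiv (13 * (a + b + 1) * (b - a)) 2 = 13 * (a + b + 1) * (b - a) := by
    have := fdiv_two_exact (13 * (a + b + 1)) (b - a) (by omega)
    linarith [this]
  linarith

-- base case: the empty range (lo = hi + 1)
theorem gAux_empty (hi : Int) : gAux (hi + 1) hi = 0 := by
  have h := gAux_double (hi + 1) hi
  have e1 : (hi + 1 + hi) * (hi - (hi + 1) + 1) = 0 := by ring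
  have e2 : PySem.Int.floordiv (hi + 1 - 1) 13 = PySem.Int.floordiv hi 13 := by norm_num
  rw [e1, e2] at h
  omega

-- fdiv step across a multiple-of-13 boundary
theorem fdiv13_step (y : Int) :
    PySem.Int.floordiv y 13 =
      PySem.Int.floordiv (y - 1) 13 + (if y % 13 = 0 then 1 else 0) := by
  rw [PySem.Int.floordiv_eq_ediv_of_pos (show (0:Int) < 13 by norm_num),
      PySem.Int.floordiv_eq_ediv_of_pos (show (0:Int) < 13 by norm_num)]
  split <;> omega

-- the one-step recurrence of the closed form
theorem gAux_step (y hi : Int) :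
    gAux y hi = (if PySem.Int.mod y 13 ≠ 0 then y else 0) + gAux (y + 1) hi := by
  have h1 := gAux_double y hi
  have h2 := gAux_double (y + 1) hi
  have e2 : (y + 1 - 1) = y := by ring
  rw [e2] at h2
  set a := PySem.Int.floordiv (y - 1) 13 with ha
  set b := PySem.Int.floordiv y 13 with hb
  set c := PySem.Int.floordiv hi 13 with hc
  have hstep : b = a + (if y % 13 = 0 then 1 else 0) := fdiv13_step y
  by_cases hz : y % 13 = 0
  · -- y is a multiple of 13: b = a + 1 and y = 13 * b
    simp only [hz, if_pos] at hstep
    have hy : y = 13 * b := by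
      have : y % 13 = y - 13 * (y / 13) := by omega
      rw [hb, PySem.Int.floordiv_eq_ediv_of_pos (by norm_num)]
      omega
    have hcontrib : (if PySem.Int.mod y 13 ≠ 0 then y else (0:Int)) = 0 := by
      simp [hz]
    rw [hcontrib]
    have key2 : 2 * gAux y hi = 2 * gAux (y + 1) hi := by
      rw [h1, h2, hstep]
      have : (y + hi) * (hi - y + 1) - (y + 1 + hi) * (hi - (y + 1) + 1) = 2 * y := by ring
      nlinarith [hy]
    omega
  · -- y is not a multiple of 13: a = b, the multiples term is unchanged
    simp only [hz, if_neg, not_false_iff] at hstep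
    have hab : b = a := by omega
    have hcontrib : (if PySem.Int.mod y 13 ≠ 0 then y else (0:Int)) = y := by
      simp [hz]
    rw [hcontrib]
    rw [hab] at h2
    have key : 2 * gAux y hi = 2 * y + 2 * gAux (y + 1) hi := by
      rw [h1, h2]
      ring
    omega

-- loop invariant: the loop computes soma + gAux y x for y ≤ x + 1
theorem multiploLoop_eq (x : Int) : ∀ (y soma : Int), y ≤ x + 1 →
    multiploLoop x y soma = soma + gAux y x := by
  intro y soma hy
  rw [multiploLoop]
  split
  · next h =>
    have ih := multiploLoop_eq x (y + 1) (if PySem.Int.mod y 13 ≠ 0 then soma + y else soma) (by omega)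
    rw [ih, gAux_step y x]
    split <;> ring
  · next h =>
    have : y = x + 1 := by omega
    subst this
    rw [gAux_empty]
    ring
termination_by y => (x + 1 - y).toNat
decreasing_by omega

-- ===== VERDICT (by name: the statement is the Claim_ definition above) =====
theorem multiplo_spec : Claim_equal_multiplo := by
  intro vx vy _
  unfold Spec_multiplo multiplo verifica_maior
  rw [multiplo_alt_eq_gAux]
  by_cases h : vy > vx
  · simp only [h, if_pos]
    have h1 : min vx vy = vx := min_eq_left (le_of_lt h)
    have h2 : max vx vy = vy := max_eq_right (le_of_lt h)
    rw [h1, h2]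
    have := multiploLoop_eq vy vx 0 (by omega)
    simpa using this
  · simp only [h, if_neg, not_false_iff]
    have h' : vy ≤ vx := by omega
    have h1 : min vx vy = vy := min_eq_right h'
    have h2 : max vx vy = vx := max_eq_left h'
    rw [h1, h2]
    have := multiploLoop_eq vx vy 0 (by omega)
    simpa using this
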